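-- pv_equiv track=rewrite | github.com/andrew2004Z/list_easy | ft_even_ index _list.py | ft_even_index_list
-- ===== SOURCE A (Python) =====
-- def ft_even_index_list(mass):
--     a = []
--     l = 0
--     for i in mass:
--         l += 1
--     for i in range(l):
--         if i % 2 == 0:
--             a.append(mass[i])
--     return a
-- ===== SOURCE B (Python) =====
-- def ft_even_index_list(mass):
--     a = []
--     take = True
--     for x in mass:
--         if take:
--             a.append(x)
--         take = not take
--     return a
-- ===== Notes on version B (the rewrite author's own statement) =====
-- stated objective: simpler
-- what changed: Replaces A's two passes (manual length count, then a range loop testing index parity and indexing mass[i]) by a single streaming pass over the elements maintaining a boolean take/skip flag, with no length computation and no indexing.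
import Mathlib
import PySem

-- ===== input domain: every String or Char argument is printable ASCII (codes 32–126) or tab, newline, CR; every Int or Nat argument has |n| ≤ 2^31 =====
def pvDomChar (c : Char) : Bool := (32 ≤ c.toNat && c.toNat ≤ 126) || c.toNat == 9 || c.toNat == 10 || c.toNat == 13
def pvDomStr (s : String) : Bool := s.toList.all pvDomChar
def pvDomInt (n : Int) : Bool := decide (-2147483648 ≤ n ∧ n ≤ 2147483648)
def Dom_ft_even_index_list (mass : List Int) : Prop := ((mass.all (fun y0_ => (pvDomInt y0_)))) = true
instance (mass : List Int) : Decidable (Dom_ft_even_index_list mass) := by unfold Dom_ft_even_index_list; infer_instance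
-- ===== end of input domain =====

-- B replaces A's two passes (count length, then index with a range loop) by one streaming
-- pass over the elements keeping a boolean take/skip flag; objective: simpler, same O(n) cost.

-- ===== PORT A =====
def ft_even_index_list (mass : List Int) : List Int :=
  let l : Int := mass.foldl (fun l _ => l + 1) 0
  (PySem.List.pyRange 0 l 1).foldl
    (fun a i =>
      if i % 2 == 0 then
        match PySem.List.pyGet? mass i with
        | some v => a ++ [v]
        | none => a        -- unreachable: i is always in range
      else a) []

-- ===== PORT B =====
def ft_even_index_list_alt (mass : List Int) : List Int :=
  (mass.foldl (fun (st : List Int × Bool) x =>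
    (if st.2 then st.1 ++ [x] else st.1, !st.2)) ([], true)).1

-- ===== PRECONDITION & SPEC =====
def Spec_ft_even_index_list (mass : List Int) (out : List Int) : Prop := out = ft_even_index_list_alt mass
instance (mass : List Int) (out : List Int) : Decidable (Spec_ft_even_index_list mass out) := by unfold Spec_ft_even_index_list; infer_instance

-- ===== CLAIM (what is proved, stated in full; the proofs are below) =====
def Claim_equal_ft_even_index_list : Prop := ∀ (mass : List Int), Dom_ft_even_index_list mass → Spec_ft_even_index_list mass (ft_even_index_list mass)

-- ===== LEMMAS AND PROOFS =====

/-- Reference selection: elements at positions where the parity flag is set. -/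
def pvSel (take : Bool) : List Int → List Int
  | [] => []
  | x :: xs => if take then x :: pvSel (!take) xs else pvSel (!take) xs

theorem pvSel_cons (take : Bool) (x : Int) (xs : List Int) :
    pvSel take (x :: xs) = if take then x :: pvSel (!take) xs else pvSel (!take) xs := rfl

/-- B's fold computes `pvSel`. -/
theorem alt_foldl_eq (l : List Int) (acc : List Int) (take : Bool) :
    (l.foldl (fun (st : List Int × Bool) x =>
      (if st.2 then st.1 ++ [x] else st.1, !st.2)) (acc, take)).1 = acc ++ pvSel take l := by
  induction l generalizing acc take with
  | nil => simp [pvSel]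
  | cons x xs ih =>
    cases take <;> simp [List.foldl_cons, pvSel, ih]

theorem count_eq_length (l : List Int) :
    l.foldl (fun (n : Int) _ => n + 1) 0 = (l.length : Int) := by
  have h : ∀ (a : Int), l.foldl (fun (n : Int) _ => n + 1) a = a + l.length := by
    induction l with
    | nil => simp
    | cons x xs ih => intro a; simp [List.foldl_cons, ih]; ring
  simpa using h 0

theorem parity_flip (c : Int) : (((c + 1) % 2 == 0) : Bool) = !(c % 2 == 0) := by
  rcases Int.emod_two_eq_zero_or_one c with h | h <;> simp [h] <;> omega

/-- A's filtered-range selection equals `pvSel`, with a parity offset `c`. -/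
theorem keyA (l : List Int) (c : Int) :
    (((List.range l.length).filter (fun i : Nat => (((i : Int) + c) % 2 == 0))).map
      (fun i => l.getD i 0)) = pvSel (c % 2 == 0) l := by
  induction l generalizing c with
  | nil => simp [pvSel]
  | cons x xs ih =>
    rw [pvSel_cons, ← parity_flip]
    have hp : ((fun i : Nat => (((i : Int) + c) % 2 == 0)) ∘ Nat.succ)
        = (fun i : Nat => (((i : Int) + (c + 1)) % 2 == 0)) := by
      funext i
      simp only [Function.comp]
      congr 1
      push_cast
      omega
    simp only [List.length_cons, List.range_succ_eq_map, List.filter_cons, List.filter_map,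
      hp]
    have htail :
        (List.filter (fun i : Nat => (((i : Int) + (c + 1)) % 2 == 0)) (List.range xs.length)).map
          ((fun i => (x :: xs).getD i 0) ∘ Nat.succ)
        = pvSel ((c + 1) % 2 == 0) xs := by
      rw [← ih (c + 1)]
      apply List.map_congr_left
      intro i hi
      simp [Function.comp]
    have h0 : ((((0 : Nat) : Int) + c) % 2 == 0) = (c % 2 == 0 : Bool) := by norm_num
    rw [h0]
    cases hcb : (c % 2 == 0 : Bool) <;>
        simp only [Bool.false_eq_true, if_false, if_true, List.map_cons, List.getD_cons_zero] <;>
      rw [List.map_map, htail]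

-- ===== VERDICT (by name: the statement is the Claim_ definition above) =====
theorem ft_even_index_list_spec : Claim_equal_ft_even_index_list := by
  intro mass _
  unfold Spec_ft_even_index_list ft_even_index_list ft_even_index_list_alt
  rw [alt_foldl_eq]
  simp only [count_eq_length]
  have hcong :
      List.foldl
        (fun a i =>
          if (i % 2 == 0) = true then
            match PySem.List.pyGet? mass i with
            | some v => a ++ [v]
            | none => a
          else a)
        [] (PySem.List.pyRange 0 (mass.length : Int) 1)
      = List.foldl (fun a i => if i % 2 == 0 then a ++ [PySem.List.pyGetD mass i 0] else a)
        [] (PySem.List.pyRange 0 (mass.length : Int) 1) := by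
    apply PySem.List.foldl_congr_mem
    intro a i hi
    rw [PySem.List.mem_pyRange_one] at hi
    have h1 : 0 ≤ i := hi.1
    have h2 : i.toNat < mass.length := by omega
    have hget : PySem.List.pyGet? mass i = some (PySem.List.pyGetD mass i 0) := by
      rw [PySem.List.pyGet?_eq_some_getElem mass h1 hi.2, PySem.List.pyGetD_of_nonneg mass 0 h1]
      simp [List.getD_eq_getElem?_getD, List.getElem?_eq_getElem h2]
    rw [hget]
  rw [hcong]
  rw [PySem.List.foldl_append_if, PySem.List.pyRange_one]
  simp only [List.nil_append, Int.sub_zero, Int.toNat_natCast, List.filter_map, List.map_map]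
  have e1 : ((fun i : Int => (i % 2 == 0)) ∘ fun k : Nat => (0 : Int) + ↑k)
      = (fun i : Nat => (((i : Int) + 0) % 2 == 0)) := by
    funext i; simp [Function.comp]
  have e2 : ((fun i : Int => PySem.List.pyGetD mass i 0) ∘ fun k : Nat => (0 : Int) + ↑k)
      = (fun i : Nat => mass.getD i 0) := by
    funext i; simp [Function.comp]
  rw [e1, e2]
  have h := keyA mass 0
  simpa using h
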